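-- pv_equiv track=rewrite | github.com/saisreyasc/wiki-translate-tagger | app.py | process_lists
-- ===== SOURCE A (Python) =====
-- def process_lists(line):
--     """
--     Processes lists (e.g., *, #, :) by adding <translate> tags around list item content.
--     """
--     for i in range(len(line)):
--         if line[i] in ['*', '#', ':', ';']:
--             continue
--         else:
--             words = line[i:].split("<br>")
--             for j in range(len(words)):
--                 worder = words[j].split(":")
--                 for k in range(len(worder)):
--                     if worder[k] == '':
--                         continue
--                     else:
--                         worder[k] = f"<translate>{worder[k]}</translate>"
--                 words[j] = ":".join(worder)
--             newstring = "<br>".join(words)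
--             return f"{line[:i]}{newstring}"
-- ===== SOURCE B (Python) =====
-- import re
--
-- def process_lists(line):
--     """
--     Processes lists (e.g., *, #, :) by adding <translate> tags around list item content.
--     """
--     content = line.lstrip('*#:;')
--     if not content:
--         return None  # empty line or markers only: A's loop falls through
--     prefix = line[:len(line) - len(content)]
--     parts = re.split(r'(<br>|:)', content)
--     out = []
--     for j, p in enumerate(parts):
--         out.append(f"<translate>{p}</translate>" if j % 2 == 0 and p else p)
--     return prefix + ''.join(out)
-- ===== Notes on version B (the rewrite author's own statement) =====
-- stated objective: idiomatic
-- what changed: A scans for the first non-marker index with an index loop and rebuilds the tail with nested break-tag/colon split-then-join passes plus two index-mutation loops; B strips the leading marker characters with lstrip and processes the tail in a single delimiter-capturing regex split, wrapping each non-empty even-indexed (non-delimiter) piece in translate tags.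
import Mathlib
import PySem

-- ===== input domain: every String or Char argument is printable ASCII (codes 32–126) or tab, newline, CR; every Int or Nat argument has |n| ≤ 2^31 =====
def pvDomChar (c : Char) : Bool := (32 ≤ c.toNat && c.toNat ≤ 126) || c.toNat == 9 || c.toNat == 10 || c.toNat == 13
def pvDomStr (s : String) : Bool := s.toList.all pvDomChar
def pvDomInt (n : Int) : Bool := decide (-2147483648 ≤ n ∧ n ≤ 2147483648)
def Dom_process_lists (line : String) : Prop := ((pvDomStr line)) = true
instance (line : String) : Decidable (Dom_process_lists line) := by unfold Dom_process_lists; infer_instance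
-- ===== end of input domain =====

-- B replaces A's find-first-index loop with nested split-then-join passes by lstrip plus one
-- delimiter-capturing re.split pass joined by index parity (objective: idiomatic; same cost).

-- ===== PORT A =====
-- f"<translate>{p}</translate>" (f-string both sources write)
def pvTrans (p : List Char) : List Char :=
  "<translate>".toList ++ p ++ "</translate>".toList

-- hand port of Python str.split("<br>") (exact: splits at leftmost non-overlapping occurrences)
def pvSplitBr : List Char → List (List Char)
  | [] => [[]]
  | c :: rest =>
    if c = '<' ∧ rest.take 3 = ['b', 'r', '>'] then
      [] :: pvSplitBr (rest.drop 3)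
    else
      match pvSplitBr rest with
      | t :: ts => (c :: t) :: ts
      | [] => [[c]]
  termination_by cs => cs.length
  decreasing_by all_goals (simp; try omega)

-- hand port of Python str.split(":") (exact)
def pvSplitColon : List Char → List (List Char)
  | [] => [[]]
  | c :: rest =>
    if c = ':' then
      [] :: pvSplitColon rest
    else
      match pvSplitColon rest with
      | t :: ts => (c :: t) :: ts
      | [] => [[c]]

-- hand port of Python sep.join(parts) (exact); pvJoinTail is its tail worker
def pvJoinTail (sep : List Char) : List (List Char) → List Char
  | [] => []
  | x :: xs => sep ++ x ++ pvJoinTail sep xs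

def pvJoinSep (sep : List Char) : List (List Char) → List Char
  | [] => []
  | x :: xs => x ++ pvJoinTail sep xs

-- A's body once line[i] is a non-marker: split by "<br>", each word split by ":",
-- wrap the non-empty pieces in <translate> tags, join everything back
def pvBodyA (cs : List Char) : List Char :=
  pvJoinSep "<br>".toList
    ((pvSplitBr cs).map (fun w =>
      pvJoinSep [':'] ((pvSplitColon w).map (fun p => if p = [] then p else pvTrans p))))

-- `ch in ['*', '#', ':', ';']` (the membership test both sources write literally)
def pvIsMarker (c : Char) : Bool := c ∈ (['*', '#', ':', ';'] : List Char)

-- for i in range(len(line)): continue on marker characters, else build and return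
def pvLoopA (cs : List Char) (i : Nat) : Option String :=
  if h : i < cs.length then
    if pvIsMarker cs[i] then
      pvLoopA cs (i + 1)
    else
      some (String.ofList (cs.take i ++ pvBodyA (cs.drop i)))
  else
    none
  termination_by cs.length - i

def process_lists (line : String) : Option String :=
  pvLoopA line.toList 0

-- ===== PORT B =====

-- hand port of re.split(r'(<br>|:)', s) (exact: leftmost scan, '<br>' tried before ':';
-- tokens at even indices interleaved with the captured delimiters at odd indices)
def pvTok : List Char → List (List Char)
  | [] => [[]]
  | c :: rest =>
    if c = '<' ∧ rest.take 3 = ['b', 'r', '>'] then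
      [] :: ['<', 'b', 'r', '>'] :: pvTok (rest.drop 3)
    else if c = ':' then
      [] :: [':'] :: pvTok rest
    else
      match pvTok rest with
      | t :: ts => (c :: t) :: ts
      | [] => [[c]]
  termination_by cs => cs.length
  decreasing_by all_goals (simp; try omega)

-- the for j, p in enumerate(parts) loop: wrap non-empty even-indexed pieces, then ''.join
def pvRender (odd : Bool) : List (List Char) → List Char
  | [] => []
  | p :: rest => (if odd = false ∧ p ≠ [] then pvTrans p else p) ++ pvRender (!odd) rest

def process_lists_alt (line : String) : Option String :=
  let cs := line.toList
  -- line.lstrip('*#:;') (exact: drops exactly the leading marker characters)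
  let content := cs.dropWhile pvIsMarker
  if content.isEmpty then none
  else
    -- line[:len(line) - len(content)] (an in-range non-negative slice bound)
    let pre := cs.take (cs.length - content.length)
    some (String.ofList (pre ++ pvRender false (pvTok content)))


-- ===== PRECONDITION & SPEC =====
def Spec_process_lists (line : String) (out : Option String) : Prop := out = process_lists_alt line
instance (line : String) (out : Option String) : Decidable (Spec_process_lists line out) := by unfold Spec_process_lists; infer_instance

-- ===== CLAIM (what is proved, stated in full; the proofs are below) =====
def Claim_equal_process_lists : Prop := ∀ (line : String), Dom_process_lists line → Spec_process_lists line (process_lists line)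

-- ===== LEMMAS AND PROOFS =====
-- ===== proof helpers =====
def pvColTail : List (List Char) → List (List Char)
  | [] => []
  | t :: ts => [':'] :: t :: pvColTail ts

def pvWithColons : List (List Char) → List (List Char)
  | [] => []
  | t :: ts => t :: pvColTail ts

def pvBrTail : List (List (List Char)) → List (List Char)
  | [] => []
  | w :: ws => ['<', 'b', 'r', '>'] :: (w ++ pvBrTail ws)

def pvWithBrs : List (List (List Char)) → List (List Char)
  | [] => []
  | w :: ws => w ++ pvBrTail ws

def pvWC (w : List Char) : List (List Char) := pvWithColons (pvSplitColon w)

theorem pvBrToList : "<br>".toList = ['<', 'b', 'r', '>'] := rfl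

theorem pvSplitColon_ne_nil (cs : List Char) : pvSplitColon cs ≠ [] := by
  cases cs with
  | nil => simp [pvSplitColon]
  | cons c rest =>
    simp only [pvSplitColon]
    split
    · simp
    · rcases h : pvSplitColon rest with _ | ⟨t, ts⟩ <;> simp

theorem pvSplitBr_ne_nil (cs : List Char) : pvSplitBr cs ≠ [] := by
  cases cs with
  | nil => simp [pvSplitBr]
  | cons c rest =>
    rw [pvSplitBr]
    split
    · simp
    · rcases h : pvSplitBr rest with _ | ⟨t, ts⟩ <;> simp

theorem pvTok_ne_nil (cs : List Char) : pvTok cs ≠ [] := by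
  cases cs with
  | nil => simp [pvTok]
  | cons c rest =>
    rw [pvTok]
    split
    · simp
    · split
      · simp
      · rcases h : pvTok rest with _ | ⟨t, ts⟩ <;> simp

theorem pvTok_eq_withBrsSplit (cs : List Char) :
    pvTok cs = pvWithBrs ((pvSplitBr cs).map pvWC) := by
  induction cs using pvTok.induct with
  | case1 =>
      simp [pvTok, pvSplitBr, pvWC, pvSplitColon, pvWithColons, pvColTail, pvWithBrs, pvBrTail]
  | case2 c rest h ih =>
      rcases hsb : pvSplitBr (rest.drop 3) with _ | ⟨t, ts⟩
      · exact absurd hsb (pvSplitBr_ne_nil _)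
      rw [pvTok, pvSplitBr, if_pos h, if_pos h, ih, hsb]
      simp [pvWC, pvSplitColon, pvWithColons, pvColTail, pvWithBrs, pvBrTail]
  | case3 rest h ih =>
      rcases hsb : pvSplitBr rest with _ | ⟨t, ts⟩
      · exact absurd hsb (pvSplitBr_ne_nil _)
      rcases hsc : pvSplitColon t with _ | ⟨u, us⟩
      · exact absurd hsc (pvSplitColon_ne_nil _)
      rw [pvTok, pvSplitBr, if_neg h, if_neg h, if_pos rfl, ih, hsb]
      simp [pvWC, pvSplitColon, pvWithColons, pvColTail, pvWithBrs, hsc]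
  | case4 c rest h1 h2 t ts x ih =>
      rcases hsb : pvSplitBr rest with _ | ⟨t', ts'⟩
      · exact absurd hsb (pvSplitBr_ne_nil _)
      rcases hsc : pvSplitColon t' with _ | ⟨u, us⟩
      · exact absurd hsc (pvSplitColon_ne_nil _)
      have key : t :: ts = u :: (pvColTail us ++ pvBrTail (ts'.map pvWC)) := by
        rw [← x, ih, hsb]
        simp [pvWC, hsc, pvWithColons, pvWithBrs]
      rw [pvTok, pvSplitBr, if_neg h1, if_neg h1, if_neg h2, hsb, x]
      injection key with k1 k2
      subst k1; subst k2
      simp [pvWC, pvSplitColon, h2, hsc, pvWithColons, pvWithBrs]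
  | case5 c rest h1 h2 x ih =>
      exact absurd x (pvTok_ne_nil rest)

theorem pvRender_cons (odd : Bool) (p : List Char) (rest : List (List Char)) :
    pvRender odd (p :: rest) = (if odd = false ∧ p ≠ [] then pvTrans p else p) ++ pvRender (!odd) rest := rfl

theorem pvRenderCol (us : List (List Char)) (u : List Char) (ds : List (List Char)) :
    pvRender false (u :: (pvColTail us ++ ds)) =
      pvJoinSep [':'] ((u :: us).map (fun p => if p = [] then p else pvTrans p)) ++
        pvRender true ds := by
  induction us generalizing u with
  | nil =>
      by_cases hu : u = [] <;>
        simp [pvColTail, pvRender, pvJoinSep, pvJoinTail, hu]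
  | cons u' us' ih =>
      rw [show pvColTail (u' :: us') ++ ds = [':'] :: u' :: (pvColTail us' ++ ds) from rfl,
          pvRender_cons, pvRender_cons]
      simp only [Bool.not_false, Bool.not_true]
      rw [ih u']
      by_cases hu : u = [] <;>
        simp [hu, pvJoinSep, pvJoinTail]

theorem pvRenderBrTail (vs : List (List Char)) :
    pvRender true (pvBrTail (vs.map pvWC)) =
      pvJoinTail "<br>".toList (vs.map (fun w =>
        pvJoinSep [':'] ((pvSplitColon w).map (fun p => if p = [] then p else pvTrans p)))) := by
  induction vs with
  | nil => simp [pvBrTail, pvRender, pvJoinTail]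
  | cons w vs ih =>
      rcases hsc : pvSplitColon w with _ | ⟨u, us⟩
      · exact absurd hsc (pvSplitColon_ne_nil _)
      simp only [List.map_cons, pvBrTail, pvRender, Bool.not_true]
      rw [show pvWC w ++ pvBrTail (vs.map pvWC) = u :: (pvColTail us ++ pvBrTail (vs.map pvWC)) by
            simp [pvWC, hsc, pvWithColons]]
      rw [pvRenderCol, ih]
      simp [pvJoinTail, pvBrToList, hsc]

theorem pvRender_withBrs (vs : List (List Char)) :
    pvRender false (pvWithBrs (vs.map pvWC)) =
      pvJoinSep "<br>".toList (vs.map (fun w =>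
        pvJoinSep [':'] ((pvSplitColon w).map (fun p => if p = [] then p else pvTrans p)))) := by
  cases vs with
  | nil => simp [pvWithBrs, pvRender, pvJoinSep]
  | cons w vs =>
      rcases hsc : pvSplitColon w with _ | ⟨u, us⟩
      · exact absurd hsc (pvSplitColon_ne_nil _)
      simp only [List.map_cons, pvWithBrs]
      rw [show pvWC w ++ pvBrTail (vs.map pvWC) = u :: (pvColTail us ++ pvBrTail (vs.map pvWC)) by
            simp [pvWC, hsc, pvWithColons]]
      rw [pvRenderCol, pvRenderBrTail]
      simp [pvJoinSep, hsc]

theorem pvBody_eq (cs : List Char) :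
    pvRender false (pvTok cs) = pvBodyA cs := by
  rw [pvTok_eq_withBrsSplit, pvRender_withBrs, pvBodyA]

theorem pvLoopA_eq (cs : List Char) (i : Nat) :
    pvLoopA cs i =
      (if (cs.drop i).dropWhile pvIsMarker = [] then none
       else some (String.ofList (cs.take i ++
           (cs.drop i).takeWhile pvIsMarker ++
           pvBodyA ((cs.drop i).dropWhile pvIsMarker)))) := by
  have key : ∀ n i, cs.length ≤ i + n →
      pvLoopA cs i =
        (if (cs.drop i).dropWhile pvIsMarker = [] then none
         else some (String.ofList (cs.take i ++
             (cs.drop i).takeWhile pvIsMarker ++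
             pvBodyA ((cs.drop i).dropWhile pvIsMarker)))) := by
    intro n
    induction n with
    | zero =>
        intro i hi
        rw [pvLoopA, dif_neg (by omega), List.drop_eq_nil_of_le (by omega)]
        simp
    | succ n ih =>
        intro i hi
        by_cases h : i < cs.length
        · have hd : cs.drop i = cs[i] :: cs.drop (i + 1) := List.drop_eq_getElem_cons h
          by_cases hm : pvIsMarker cs[i]
          · rw [pvLoopA, dif_pos h, if_pos hm, ih (i + 1) (by omega), hd]
            have ht : cs.take (i + 1) = cs.take i ++ [cs[i]] := by
              rw [List.take_succ]; simp [h]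
            have e1 : List.dropWhile pvIsMarker (cs[i] :: cs.drop (i + 1)) =
                List.dropWhile pvIsMarker (cs.drop (i + 1)) := by
              rw [List.dropWhile_cons, if_pos hm]
            have e2 : List.takeWhile pvIsMarker (cs[i] :: cs.drop (i + 1)) =
                cs[i] :: List.takeWhile pvIsMarker (cs.drop (i + 1)) := by
              rw [List.takeWhile_cons, if_pos hm]
            rw [e1, e2]
            by_cases hc : List.dropWhile pvIsMarker (cs.drop (i + 1)) = []
            · rw [if_pos hc, if_pos hc]
            · rw [if_neg hc, if_neg hc]
              refine congrArg (fun l => some (String.ofList l)) ?_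
              rw [ht]
              simp only [List.append_assoc, List.singleton_append, List.cons_append, List.nil_append]
          · rw [pvLoopA, dif_pos h, if_neg hm, hd]
            have e1 : List.dropWhile pvIsMarker (cs[i] :: cs.drop (i + 1)) =
                cs[i] :: cs.drop (i + 1) := by
              rw [List.dropWhile_cons, if_neg hm]
            have e2 : List.takeWhile pvIsMarker (cs[i] :: cs.drop (i + 1)) = [] := by
              rw [List.takeWhile_cons, if_neg hm]
            rw [e1, e2, if_neg (List.cons_ne_nil _ _)]
            refine congrArg (fun l => some (String.ofList l)) ?_
            simp
        · rw [pvLoopA, dif_neg h, List.drop_eq_nil_of_le (by omega)]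
          simp
  exact key cs.length i (by omega)

theorem pvFinal (line : String) : process_lists line = process_lists_alt line := by
  rw [process_lists, process_lists_alt, pvLoopA_eq]
  simp only [List.drop_zero, List.take_zero, List.nil_append, List.isEmpty_iff]
  by_cases hc : line.toList.dropWhile pvIsMarker = []
  · simp [hc]
  · have h3 := List.takeWhile_append_dropWhile (p := pvIsMarker) (l := line.toList)
    have hlen : line.toList.length - (line.toList.dropWhile pvIsMarker).length =
        (line.toList.takeWhile pvIsMarker).length := by
      have h4 := congrArg List.length h3
      simp only [List.length_append] at h4
      omega
    have htake : line.toList.take ((line.toList.takeWhile pvIsMarker).length) =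
        line.toList.takeWhile pvIsMarker :=
      (List.prefix_iff_eq_take.mp (List.takeWhile_prefix _)).symm
    have hL : line.length = line.toList.length := by simp
    have hlen2 : line.length - (line.toList.dropWhile pvIsMarker).length =
        (line.toList.takeWhile pvIsMarker).length := by rw [hL]; exact hlen
    simp [hc, pvBody_eq, hlen2, htake]

-- ===== VERDICT (by name: the statement is the Claim_ definition above) =====
theorem process_lists_spec : Claim_equal_process_lists := by
  intro line _
  exact pvFinal line
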